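-- pv_equiv track=rewrite | github.com/sahil-kale/random-controls-fun | mrac_fun/mrac_tclab_controller.py | get_reference_temps
-- ===== SOURCE A (Python) =====
-- def get_reference_temps(t):
--     schedule = [
--         (500, [40, 40]),
--         (1000, [60, 30]),
--         (1500, [40, 40]),
--         (2000, [50, 50]),
--         (2500, [40, 45]),
--         (3000, [40, 40]),
--         (3500, [50, 30]),
--         (4000, [30, 40]),
--         (4500, [40, 50]),
--     ]
--     for threshold, temps in schedule:
--         if t < threshold:
--             return temps
--     return [50, 30]
-- ===== SOURCE B (Python) =====
-- def get_reference_temps(t):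
--     thresholds = [500, 1000, 1500, 2000, 2500, 3000, 3500, 4000, 4500]
--     temps = [
--         [40, 40], [60, 30], [40, 40], [50, 50], [40, 45],
--         [40, 40], [50, 30], [30, 40], [40, 50], [50, 30],
--     ]
--     lo, hi = 0, len(thresholds)
--     while lo < hi:
--         mid = (lo + hi) // 2
--         if t < thresholds[mid]:
--             hi = mid
--         else:
--             lo = mid + 1
--     return temps[lo]
-- ===== Notes on version B (the rewrite author's own statement) =====
-- stated objective: alternative
-- what changed: Replaced the linear scan over (threshold, temps) pairs with a hand-written bisect_right binary search over a sorted threshold list indexing into a parallel temps table (with the out-of-range pair appended).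
import Mathlib
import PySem

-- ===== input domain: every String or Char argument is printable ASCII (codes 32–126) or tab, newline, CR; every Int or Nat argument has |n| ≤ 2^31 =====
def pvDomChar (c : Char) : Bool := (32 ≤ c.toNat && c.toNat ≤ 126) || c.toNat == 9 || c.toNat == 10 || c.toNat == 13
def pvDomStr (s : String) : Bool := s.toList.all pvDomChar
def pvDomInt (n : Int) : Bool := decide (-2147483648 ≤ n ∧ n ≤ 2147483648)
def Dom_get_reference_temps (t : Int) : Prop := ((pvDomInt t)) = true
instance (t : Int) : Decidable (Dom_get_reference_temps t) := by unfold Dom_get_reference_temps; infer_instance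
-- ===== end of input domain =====

-- B replaces A's sequential threshold scan with a bisect_right binary search into a
-- sorted threshold table and a parallel temps table (objective: alternative algorithm).

-- ===== PORT A =====
-- the for-loop over the schedule, as structural recursion in the same order
def pvScanA (t : Int) : List (Int × List Int) → List Int
  | [] => [50, 30]
  | (threshold, temps) :: rest => if t < threshold then temps else pvScanA t rest

def get_reference_temps (t : Int) : List Int :=
  pvScanA t
    [(500, [40, 40]), (1000, [60, 30]), (1500, [40, 40]), (2000, [50, 50]),
     (2500, [40, 45]), (3000, [40, 40]), (3500, [50, 30]), (4000, [30, 40]),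
     (4500, [40, 50])]

-- ===== PORT B =====
-- the while-loop of Source B, with fuel = |thresholds| bounding the iterations (a binary
-- search over n elements loops at most n times, so the fuel is never exhausted)
def pvBisect (t : Int) (xs : List Int) (fuel lo hi : Nat) : Nat :=
  match fuel with
  | 0 => lo
  | fuel + 1 =>
    if lo < hi then
      let mid := (lo + hi) / 2
      if t < xs.getD mid 0 then pvBisect t xs fuel lo mid
      else pvBisect t xs fuel (mid + 1) hi
    else lo

def get_reference_temps_alt (t : Int) : List Int :=
  let thresholds : List Int := [500, 1000, 1500, 2000, 2500, 3000, 3500, 4000, 4500]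
  let temps : List (List Int) :=
    [[40, 40], [60, 30], [40, 40], [50, 50], [40, 45],
     [40, 40], [50, 30], [30, 40], [40, 50], [50, 30]]
  temps.getD (pvBisect t thresholds thresholds.length 0 thresholds.length) []

-- ===== PRECONDITION & SPEC =====
def Spec_get_reference_temps (t : Int) (out : List Int) : Prop := out = get_reference_temps_alt t
instance (t : Int) (out : List Int) : Decidable (Spec_get_reference_temps t out) := by unfold Spec_get_reference_temps; infer_instance

-- ===== CLAIM (what is proved, stated in full; the proofs are below) =====
def Claim_equal_get_reference_temps : Prop := ∀ (t : Int), Dom_get_reference_temps t → Spec_get_reference_temps t (get_reference_temps t)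

-- ===== LEMMAS AND PROOFS =====

-- ===== VERDICT (by name: the statement is the Claim_ definition above) =====
theorem get_reference_temps_spec : Claim_equal_get_reference_temps := by
  intro t _
  unfold Spec_get_reference_temps get_reference_temps get_reference_temps_alt
  have H : t < 500 ∨ (500 ≤ t ∧ t < 1000) ∨ (1000 ≤ t ∧ t < 1500) ∨ (1500 ≤ t ∧ t < 2000) ∨ (2000 ≤ t ∧ t < 2500) ∨ (2500 ≤ t ∧ t < 3000) ∨ (3000 ≤ t ∧ t < 3500) ∨ (3500 ≤ t ∧ t < 4000) ∨ (4000 ≤ t ∧ t < 4500) ∨ 4500 ≤ t := by omega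
  rcases H with h | h | h | h | h | h | h | h | h | h
  · have f0 : t < 500 := by omega
    have f1 : t < 1000 := by omega
    have f2 : t < 1500 := by omega
    have f3 : t < 2000 := by omega
    have f4 : t < 2500 := by omega
    have f5 : t < 3000 := by omega
    have f6 : t < 3500 := by omega
    have f7 : t < 4000 := by omega
    have f8 : t < 4500 := by omega
    simp [pvScanA, pvBisect, f0, f1, f2, f4]
  · have f0 : ¬ t < 500 := by omega
    have f1 : t < 1000 := by omega
    have f2 : t < 1500 := by omega
    have f3 : t < 2000 := by omega
    have f4 : t < 2500 := by omega
    have f5 : t < 3000 := by omega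
    have f6 : t < 3500 := by omega
    have f7 : t < 4000 := by omega
    have f8 : t < 4500 := by omega
    simp [pvScanA, pvBisect, f0, f1, f2, f4]
  · have f0 : ¬ t < 500 := by omega
    have f1 : ¬ t < 1000 := by omega
    have f2 : t < 1500 := by omega
    have f3 : t < 2000 := by omega
    have f4 : t < 2500 := by omega
    have f5 : t < 3000 := by omega
    have f6 : t < 3500 := by omega
    have f7 : t < 4000 := by omega
    have f8 : t < 4500 := by omega
    simp [pvScanA, pvBisect, f0, f1, f2, f4]
  · have f0 : ¬ t < 500 := by omega
    have f1 : ¬ t < 1000 := by omega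
    have f2 : ¬ t < 1500 := by omega
    have f3 : t < 2000 := by omega
    have f4 : t < 2500 := by omega
    have f5 : t < 3000 := by omega
    have f6 : t < 3500 := by omega
    have f7 : t < 4000 := by omega
    have f8 : t < 4500 := by omega
    simp [pvScanA, pvBisect, f0, f1, f2, f3, f4]
  · have f0 : ¬ t < 500 := by omega
    have f1 : ¬ t < 1000 := by omega
    have f2 : ¬ t < 1500 := by omega
    have f3 : ¬ t < 2000 := by omega
    have f4 : t < 2500 := by omega
    have f5 : t < 3000 := by omega
    have f6 : t < 3500 := by omega
    have f7 : t < 4000 := by omega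
    have f8 : t < 4500 := by omega
    simp [pvScanA, pvBisect, f0, f1, f2, f3, f4]
  · have f0 : ¬ t < 500 := by omega
    have f1 : ¬ t < 1000 := by omega
    have f2 : ¬ t < 1500 := by omega
    have f3 : ¬ t < 2000 := by omega
    have f4 : ¬ t < 2500 := by omega
    have f5 : t < 3000 := by omega
    have f6 : t < 3500 := by omega
    have f7 : t < 4000 := by omega
    have f8 : t < 4500 := by omega
    simp [pvScanA, pvBisect, f0, f1, f2, f3, f4, f5, f6, f7]
  · have f0 : ¬ t < 500 := by omega
    have f1 : ¬ t < 1000 := by omega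
    have f2 : ¬ t < 1500 := by omega
    have f3 : ¬ t < 2000 := by omega
    have f4 : ¬ t < 2500 := by omega
    have f5 : ¬ t < 3000 := by omega
    have f6 : t < 3500 := by omega
    have f7 : t < 4000 := by omega
    have f8 : t < 4500 := by omega
    simp [pvScanA, pvBisect, f0, f1, f2, f3, f4, f5, f6, f7]
  · have f0 : ¬ t < 500 := by omega
    have f1 : ¬ t < 1000 := by omega
    have f2 : ¬ t < 1500 := by omega
    have f3 : ¬ t < 2000 := by omega
    have f4 : ¬ t < 2500 := by omega
    have f5 : ¬ t < 3000 := by omega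
    have f6 : ¬ t < 3500 := by omega
    have f7 : t < 4000 := by omega
    have f8 : t < 4500 := by omega
    simp [pvScanA, pvBisect, f0, f1, f2, f3, f4, f5, f6, f7]
  · have f0 : ¬ t < 500 := by omega
    have f1 : ¬ t < 1000 := by omega
    have f2 : ¬ t < 1500 := by omega
    have f3 : ¬ t < 2000 := by omega
    have f4 : ¬ t < 2500 := by omega
    have f5 : ¬ t < 3000 := by omega
    have f6 : ¬ t < 3500 := by omega
    have f7 : ¬ t < 4000 := by omega
    have f8 : t < 4500 := by omega
    simp [pvScanA, pvBisect, f0, f1, f2, f3, f4, f5, f6, f7, f8]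
  · have f0 : ¬ t < 500 := by omega
    have f1 : ¬ t < 1000 := by omega
    have f2 : ¬ t < 1500 := by omega
    have f3 : ¬ t < 2000 := by omega
    have f4 : ¬ t < 2500 := by omega
    have f5 : ¬ t < 3000 := by omega
    have f6 : ¬ t < 3500 := by omega
    have f7 : ¬ t < 4000 := by omega
    have f8 : ¬ t < 4500 := by omega
    simp [pvScanA, pvBisect, f0, f1, f2, f3, f4, f5, f6, f7, f8]
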